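-- pv_equiv track=rewrite | github.com/kishwarshafin/jarvis | bed_liftover_from_paf.py | list_to_interval
-- ===== SOURCE A (Python) =====
-- def list_to_interval(position_list):
--     position_list = sorted(position_list)
--     current_anchor = -1
--     intervals = []
--
--     for i in range(0, len(position_list)):
--         if current_anchor == -1:
--             current_anchor = i
--         elif position_list[i] - position_list[i-1] > 1:
--             intervals.append([position_list[current_anchor], position_list[i-1]])
--             current_anchor = i
--
--     if current_anchor != -1:
--         intervals.append([position_list[current_anchor], position_list[-1]])
--     else:
--         intervals.append([position_list[-1], position_list[-1]])
--
--     return intervals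
-- ===== SOURCE B (Python) =====
-- def list_to_interval(position_list):
--     present = set(position_list)
--     starts = sorted(x for x in present if x - 1 not in present)
--     ends = sorted(x for x in present if x + 1 not in present)
--     return [[a, b] for a, b in zip(starts, ends)]
-- ===== Notes on version B (the rewrite author's own statement) =====
-- stated objective: alternative
-- what changed: Replaces A's sort-then-adjacent-gap scan by the hash-set run-boundary algorithm: build a set of positions, a value x starts a run iff x-1 is absent and ends one iff x+1 is absent, then zip the sorted run starts with the sorted run ends.
import Mathlib
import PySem

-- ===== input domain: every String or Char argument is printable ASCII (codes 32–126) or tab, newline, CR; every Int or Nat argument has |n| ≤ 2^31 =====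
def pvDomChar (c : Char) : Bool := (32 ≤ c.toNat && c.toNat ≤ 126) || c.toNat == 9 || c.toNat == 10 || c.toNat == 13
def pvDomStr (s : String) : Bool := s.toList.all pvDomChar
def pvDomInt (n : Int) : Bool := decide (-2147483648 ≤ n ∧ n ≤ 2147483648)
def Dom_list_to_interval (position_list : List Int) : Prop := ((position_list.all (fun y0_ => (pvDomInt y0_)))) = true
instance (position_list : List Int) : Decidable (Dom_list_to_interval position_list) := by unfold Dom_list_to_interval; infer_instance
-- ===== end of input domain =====

-- B finds runs via a hash-set boundary test (x starts a run iff x-1 absent, ends one iff x+1 absent) and zips sorted starts with sorted ends, instead of A's sort-then-adjacent-gap scan (return value only; alternative algorithm).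


-- ===== PORT A =====
def list_to_interval (position_list : List Int) : List (List Int) :=
  let s := PySem.List.sorted position_list (fun x => x) false
  let st := (PySem.List.pyRange 0 (s.length : Int) 1).foldl
    (fun (st : Int × List (List Int)) i =>
      if st.1 == -1 then (i, st.2)
      else if PySem.List.pyGetD s i 0 - PySem.List.pyGetD s (i - 1) 0 > 1 then
        (i, st.2 ++ [[PySem.List.pyGetD s st.1 0, PySem.List.pyGetD s (i - 1) 0]])
      else st)
    (-1, [])
  if st.1 != -1 then
    st.2 ++ [[PySem.List.pyGetD s st.1 0, PySem.List.pyGetD s (-1) 0]]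
  else
    st.2 ++ [[PySem.List.pyGetD s (-1) 0, PySem.List.pyGetD s (-1) 0]]

-- ===== PORT B =====
def list_to_interval_alt (position_list : List Int) : List (List Int) :=
  let present : List Int := PySem.Set.ofList position_list
  let starts := PySem.List.sorted (present.filter (fun x => !(PySem.Set.contains present (x - 1)))) (fun x => x) false
  let ends := PySem.List.sorted (present.filter (fun x => !(PySem.Set.contains present (x + 1)))) (fun x => x) false
  List.zipWith (fun a b => [a, b]) starts ends

-- ===== PRECONDITION & SPEC =====
-- Pre_ excludes only the empty list, on which the Python A raises IndexError.
def Pre_list_to_interval (position_list : List Int) : Prop := position_list ≠ []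
instance (position_list : List Int) : Decidable (Pre_list_to_interval position_list) := by unfold Pre_list_to_interval; infer_instance
def pvWitness_list_to_interval : List Int := [3, 1, 2, 7]
def Spec_list_to_interval (position_list : List Int) (out : List (List Int)) : Prop := out = list_to_interval_alt position_list
instance (position_list : List Int) (out : List (List Int)) : Decidable (Spec_list_to_interval position_list out) := by unfold Spec_list_to_interval; infer_instance

-- ===== CLAIM (what is proved, stated in full; the proofs are below) =====
def Claim_equal_list_to_interval : Prop := ∀ (position_list : List Int), Dom_list_to_interval position_list → Pre_list_to_interval position_list → Spec_list_to_interval position_list (list_to_interval position_list)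

-- ===== LEMMAS AND PROOFS =====

-- canonical grouping of a sorted list into maximal gap-≤1 runs
def pvGroups (start prev : Int) : List Int → List (List Int)
  | [] => [[start, prev]]
  | x :: rest => if x - prev > 1 then [start, prev] :: pvGroups x x rest else pvGroups start x rest

-- adjacent-duplicate removal (destutter) relative to a previous value
def pvDd (p : Int) : List Int → List Int
  | [] => []
  | x :: t => if x = p then pvDd p t else x :: pvDd x t

theorem pvGroups_pvDd (t : List Int) : ∀ (start prev : Int),
    pvGroups start prev t = pvGroups start prev (pvDd prev t) := by
  induction t with
  | nil => intro start prev; rfl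
  | cons x t' ih =>
    intro start prev
    by_cases hx : x = prev
    · subst hx
      simp [pvGroups, pvDd, ih]
    · simp only [pvDd, if_neg hx, pvGroups]
      by_cases hgap : x - prev > 1
      · simp only [if_pos hgap, ih]
      · simp only [if_neg hgap, ih]

theorem pvDd_mem (t : List Int) : ∀ (p a : Int), (a ∈ p :: pvDd p t) ↔ (a ∈ p :: t) := by
  induction t with
  | nil => intro p a; rfl
  | cons x t' ih =>
    intro p a
    by_cases hx : x = p
    · subst hx
      simp only [pvDd, if_pos]
      rw [ih x a]
      simp only [List.mem_cons]
      tauto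
    · simp only [pvDd, if_neg hx]
      have h := ih x a
      simp only [List.mem_cons] at *
      tauto

theorem pvDd_pairwise (t : List Int) : ∀ (p : Int), List.Pairwise (· ≤ ·) (p :: t) →
    List.Pairwise (· < ·) (p :: pvDd p t) := by
  induction t with
  | nil => intro p _; simp [pvDd]
  | cons x t' ih =>
    intro p h
    rw [List.pairwise_cons] at h
    obtain ⟨hpall, h2⟩ := h
    have hpx : p ≤ x := hpall x (List.mem_cons_self ..)
    rw [List.pairwise_cons] at h2
    obtain ⟨hxall, h3⟩ := h2
    by_cases hx : x = p
    · subst hx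
      rw [show pvDd x (x :: t') = pvDd x t' from by simp [pvDd]]
      exact ih x (List.pairwise_cons.mpr ⟨hxall, h3⟩)
    · simp only [pvDd, if_neg hx]
      have hx2 : List.Pairwise (fun a b => a < b) (x :: pvDd x t') :=
        ih x (List.pairwise_cons.mpr ⟨hxall, h3⟩)
      rw [List.pairwise_cons]
      refine ⟨?_, hx2⟩
      intro b hb
      rcases List.mem_cons.mp hb with h | h
      · subst h; exact lt_of_le_of_ne hpx (Ne.symm hx)
      · have hbmem : b ∈ x :: pvDd x t' := List.mem_cons_of_mem _ h
        have : b ∈ x :: t' := (pvDd_mem t' x b).mp hbmem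
        rcases List.mem_cons.mp this with h' | h'
        · subst h'; exact lt_of_le_of_ne hpx (Ne.symm hx)
        · exact lt_of_lt_of_le (lt_of_le_of_ne hpx (Ne.symm hx)) (hxall b h')

-- the boundary-filter/zip computation equals pvGroups, on a strictly increasing chain
theorem pvZip_eq_pvGroups (t : List Int) : ∀ (prev start : Int), List.Pairwise (· < ·) (prev :: t) →
    List.zipWith (fun a b => [a, b])
      (start :: t.filter (fun a => !((prev :: t).contains (a - 1))))
      ((prev :: t).filter (fun a => !((prev :: t).contains (a + 1))))
    = pvGroups start prev t := by
  induction t with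
  | nil =>
    intro prev start _
    simp only [List.filter_nil, List.filter_cons, List.contains_cons, List.contains_nil]
    have : ((prev + 1 : Int) == prev) = false := by simp only [beq_eq_false_iff_ne, ne_eq]; omega
    simp [this, pvGroups]
  | cons y t' ih =>
    intro prev start h
    rw [List.pairwise_cons] at h
    obtain ⟨hpall, h2⟩ := h
    have hpy : prev < y := hpall y (List.mem_cons_self ..)
    have hall : ∀ z ∈ t', y < z := fun z hz => List.rel_of_pairwise_cons h2 hz
    have hmem_shift : ∀ a : Int, prev < a →
        ((prev :: y :: t').contains a = (y :: t').contains a) := by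
      intro a ha
      simp only [List.contains_cons]
      have : (a == prev) = false := by simp only [beq_eq_false_iff_ne, ne_eq]; omega
      simp [this]
    -- filter over t' : membership tests of a-1 / a+1 never see prev
    have hstarts : t'.filter (fun a => !((prev :: y :: t').contains (a - 1)))
        = t'.filter (fun a => !((y :: t').contains (a - 1))) := by
      apply List.filter_congr
      intro a ha
      have hya : y < a := hall a ha
      rw [hmem_shift (a - 1) (by omega : prev < a - 1)]
    have hends : (y :: t').filter (fun a => !((prev :: y :: t').contains (a + 1)))
        = (y :: t').filter (fun a => !((y :: t').contains (a + 1))) := by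
      apply List.filter_congr
      intro a ha
      have hya : y ≤ a := by
        rcases List.mem_cons.mp ha with h | h
        · omega
        · exact le_of_lt (hall a h)
      rw [hmem_shift (a + 1) (by omega)]
    by_cases hgap : y - prev > 1
    · -- prev ends a run, y starts a new one
      have hy_start : ((prev :: y :: t').contains (y - 1)) = false := by
        simp only [List.contains_cons]
        have h1 : ((y - 1 : Int) == prev) = false := by simp only [beq_eq_false_iff_ne, ne_eq]; omega
        have h2 : ((y - 1 : Int) == y) = false := by simp only [beq_eq_false_iff_ne, ne_eq]; omega
        simp only [h1, h2, Bool.false_or]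
        rw [List.contains_eq_any_beq]
        simp only [List.any_eq_false]
        intro z hz
        have := hall z hz
        simp only [beq_iff_eq]; omega
      have hprev_end : ((prev :: y :: t').contains (prev + 1)) = false := by
        simp only [List.contains_cons]
        have h1 : ((prev + 1 : Int) == prev) = false := by simp only [beq_eq_false_iff_ne, ne_eq]; omega
        have h2 : ((prev + 1 : Int) == y) = false := by simp only [beq_eq_false_iff_ne, ne_eq]; omega
        simp only [h1, h2, Bool.false_or]
        rw [List.contains_eq_any_beq]
        simp only [List.any_eq_false]
        intro z hz
        have := hall z hz
        simp only [beq_iff_eq]; omega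
      rw [show ((prev :: y :: t').filter (fun a => !((prev :: y :: t').contains (a + 1))))
            = prev :: ((y :: t').filter (fun a => !((prev :: y :: t').contains (a + 1)))) from by
        rw [List.filter_cons]; simp only [hprev_end, Bool.not_false]; simp]
      rw [hends]
      rw [show ((y :: t').filter (fun a => !((prev :: y :: t').contains (a - 1))))
            = y :: (t'.filter (fun a => !((prev :: y :: t').contains (a - 1)))) from by
        rw [List.filter_cons]; simp only [hy_start, Bool.not_true]; simp]
      rw [hstarts]
      simp only [List.zipWith_cons_cons]
      rw [ih y y h2]
      simp only [pvGroups, if_pos hgap]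
    · -- y = prev + 1 : same run continues
      have hy : y = prev + 1 := by omega
      have hy_start : ((prev :: y :: t').contains (y - 1)) = true := by
        simp only [List.contains_cons]
        have : ((y - 1 : Int) == prev) = true := by simp only [beq_iff_eq]; omega
        simp [this]
      have hprev_end : ((prev :: y :: t').contains (prev + 1)) = true := by
        simp only [List.contains_cons]
        have : ((prev + 1 : Int) == y) = true := by simp only [beq_iff_eq]; omega
        simp [this]
      rw [show ((prev :: y :: t').filter (fun a => !((prev :: y :: t').contains (a + 1))))
            = ((y :: t').filter (fun a => !((prev :: y :: t').contains (a + 1)))) from by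
        rw [List.filter_cons]; simp only [hprev_end, Bool.not_false]; simp]
      rw [hends]
      rw [show ((y :: t').filter (fun a => !((prev :: y :: t').contains (a - 1))))
            = (t'.filter (fun a => !((prev :: y :: t').contains (a - 1)))) from by
        rw [List.filter_cons]; simp only [hy_start, Bool.not_true]; simp]
      rw [hstarts]
      rw [ih y start h2]
      simp only [pvGroups, if_neg hgap]

-- A's fold equals pvGroups (index-based loop characterisation)
theorem pvA_fold (s : List Int) (n : Nat) : ∀ (k : Nat) (anchor : Int) (acc : List (List Int)),
    s.length - k = n → 1 ≤ k → k ≤ s.length → 0 ≤ anchor → anchor < (k : Int) →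
    (let st := (PySem.List.pyRange (k : Int) (s.length : Int) 1).foldl
      (fun (st : Int × List (List Int)) i =>
        if st.1 == -1 then (i, st.2)
        else if PySem.List.pyGetD s i 0 - PySem.List.pyGetD s (i - 1) 0 > 1 then
          (i, st.2 ++ [[PySem.List.pyGetD s st.1 0, PySem.List.pyGetD s (i - 1) 0]])
        else st)
      (anchor, acc);
     0 ≤ st.1 ∧
       st.2 ++ [[PySem.List.pyGetD s st.1 0, PySem.List.pyGetD s (-1) 0]]
         = acc ++ pvGroups (PySem.List.pyGetD s anchor 0) (PySem.List.pyGetD s ((k : Int) - 1) 0) (s.drop k)) := by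
  induction n with
  | zero =>
    intro k anchor acc hn hk1 hkle ha0 hak
    have hk : k = s.length := by omega
    subst hk
    rw [PySem.List.pyRange_one_eq_nil (by omega)]
    refine ⟨ha0, ?_⟩
    simp only [List.foldl_nil, List.drop_length, pvGroups]
    have heq : PySem.List.pyGetD s (-1) 0 = PySem.List.pyGetD s ((s.length : Int) - 1) 0 := by
      rw [PySem.List.pyGetD_neg_ofNat s 1 0 (by omega) (by omega)]
      have h1 : ((s.length : Int) - 1) = ((s.length - 1 : Nat) : Int) := by omega
      rw [h1, PySem.List.pyGetD_natCast]
      rw [List.getD_eq_getElem _ _ (by omega)]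
    rw [heq]
  | succ m ih =>
    intro k anchor acc hn hk1 hkle ha0 hak
    have hklt : k < s.length := by omega
    rw [PySem.List.pyRange_one_cons (by exact_mod_cast hklt)]
    simp only [List.foldl_cons]
    have hanc : ((anchor == -1) = false) := by
      simp only [beq_eq_false_iff_ne, ne_eq]; omega
    rw [hanc]
    simp only [Bool.false_eq_true, if_false]
    have hgk : PySem.List.pyGetD s (k : Int) 0 = s[k]'hklt := by
      rw [PySem.List.pyGetD_natCast]
      exact List.getD_eq_getElem s 0 hklt
    have hdrop : s.drop k = s[k]'hklt :: s.drop (k + 1) := List.drop_eq_getElem_cons hklt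
    have hcast : ((k : Int) + 1) = ((k + 1 : Nat) : Int) := by push_cast; ring
    rw [hcast]
    by_cases hgap : PySem.List.pyGetD s (k : Int) 0 - PySem.List.pyGetD s ((k : Int) - 1) 0 > 1
    · rw [if_pos hgap]
      obtain ⟨h1, h2⟩ := ih (k + 1) (k : Int)
        (acc ++ [[PySem.List.pyGetD s anchor 0, PySem.List.pyGetD s ((k : Int) - 1) 0]])
        (by omega) (by omega) (by omega) (by omega) (by push_cast; omega)
      rw [show (((k + 1 : Nat) : Int) - 1) = (k : Int) from by push_cast; ring] at h2
      refine ⟨h1, ?_⟩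
      rw [h2, hdrop]
      simp only [pvGroups]
      rw [if_pos (by rw [hgk] at hgap; exact hgap)]
      rw [hgk]
      simp
    · rw [if_neg hgap]
      obtain ⟨h1, h2⟩ := ih (k + 1) anchor acc (by omega) (by omega) (by omega) ha0 (by push_cast; omega)
      rw [show (((k + 1 : Nat) : Int) - 1) = (k : Int) from by push_cast; ring] at h2
      refine ⟨h1, ?_⟩
      rw [h2, hdrop]
      simp only [pvGroups]
      rw [if_neg (by rw [hgk] at hgap; exact hgap)]
      rw [hgk]

-- ===== VERDICT (by name: the statement is the Claim_ definition above) =====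
theorem list_to_interval_spec : Claim_equal_list_to_interval := by
  intro xs _ hpre
  unfold Spec_list_to_interval list_to_interval list_to_interval_alt
  simp only []
  set s := PySem.List.sorted xs (fun x => x) false with hs
  have hne : s ≠ [] := by
    intro h
    apply hpre
    have hperm := PySem.List.sorted_perm (xs := xs) (key := fun x => x) (rev := false)
    rw [← hs, h] at hperm
    exact (List.Perm.nil_eq hperm).symm
  have hlen : 1 ≤ s.length := List.length_pos_of_ne_nil hne
  obtain ⟨s0, t, hst⟩ : ∃ s0 t, s = s0 :: t := by
    cases hsc : s with
    | nil => exact absurd hsc hne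
    | cons a b => exact ⟨a, b, rfl⟩
  -- ===== A side: the fold equals pvGroups s0 s0 t =====
  have hr : PySem.List.pyRange 0 (s.length : Int) 1 = 0 :: PySem.List.pyRange 1 (s.length : Int) 1 := by
    have := PySem.List.pyRange_one_cons (a := 0) (b := (s.length : Int)) (by exact_mod_cast hlen)
    norm_num at this
    exact this
  rw [hr, List.foldl_cons]
  simp only [show (((-1 : Int)) == -1) = true from by decide, if_true]
  obtain ⟨hA1, hA2⟩ := pvA_fold s (s.length - 1) 1 0 [] (by omega) (by omega) (by omega) (by omega) (by norm_num)
  simp only [Nat.cast_one] at hA1 hA2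
  rw [show ((1 : Int) - 1) = 0 from by norm_num, List.nil_append] at hA2
  have hget0 : PySem.List.pyGetD s 0 0 = s0 := by
    rw [show ((0 : Int)) = ((0 : Nat) : Int) from by norm_num, PySem.List.pyGetD_natCast, hst]
    rfl
  have hdrop1 : s.drop 1 = t := by rw [hst]; rfl
  rw [hget0, hdrop1] at hA2
  -- ===== B side: the boundary filters =====
  have hsorted : List.Pairwise (fun a b => a ≤ b) s := by
    have := PySem.List.sorted_pairwise (xs := xs) (key := fun x => x)
    rw [← hs] at this
    exact this
  have hdlt : List.Pairwise (fun a b => a < b) (s0 :: pvDd s0 t) := pvDd_pairwise t s0 (hst ▸ hsorted)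
  have hdmem : ∀ a : Int, a ∈ (s0 :: pvDd s0 t) ↔ a ∈ s := by intro a; rw [hst]; exact pvDd_mem t s0 a
  have hdnd : (s0 :: pvDd s0 t).Nodup := hdlt.imp (fun h => ne_of_lt h)
  set present := PySem.Set.ofList xs with hp
  have hmem_pd : ∀ a : Int, a ∈ present ↔ a ∈ (s0 :: pvDd s0 t) := by
    intro a
    rw [hp, PySem.Set.mem_ofList, hdmem a, hs, PySem.List.mem_sorted]
  have hperm : (s0 :: pvDd s0 t).Perm present :=
    (List.perm_ext_iff_of_nodup hdnd (by rw [hp]; exact PySem.Set.nodup_ofList xs)).mpr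
      (fun a => (hmem_pd a).symm)
  have hcontains : ∀ a : Int, PySem.Set.contains present a = (s0 :: pvDd s0 t).contains a := by
    intro a
    rw [Bool.eq_iff_iff, PySem.Set.contains_eq_listContains, List.contains_iff_mem, List.contains_iff_mem]
    exact hmem_pd a
  have hfs : PySem.List.sorted (present.filter (fun x => !(PySem.Set.contains present (x - 1)))) (fun x => x) false
      = (s0 :: pvDd s0 t).filter (fun a => !((s0 :: pvDd s0 t).contains (a - 1))) := by
    rw [show present.filter (fun x => !(PySem.Set.contains present (x - 1)))
          = present.filter (fun a => !((s0 :: pvDd s0 t).contains (a - 1))) from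
      List.filter_congr (fun a _ => by rw [hcontains])]
    exact PySem.List.sorted_eq_of_perm_of_pairwise_lt _ _ _ (hperm.filter _)
      (List.Pairwise.sublist List.filter_sublist hdlt)
  have hfe : PySem.List.sorted (present.filter (fun x => !(PySem.Set.contains present (x + 1)))) (fun x => x) false
      = (s0 :: pvDd s0 t).filter (fun a => !((s0 :: pvDd s0 t).contains (a + 1))) := by
    rw [show present.filter (fun x => !(PySem.Set.contains present (x + 1)))
          = present.filter (fun a => !((s0 :: pvDd s0 t).contains (a + 1))) from
      List.filter_congr (fun a _ => by rw [hcontains])]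
    exact PySem.List.sorted_eq_of_perm_of_pairwise_lt _ _ _ (hperm.filter _)
      (List.Pairwise.sublist List.filter_sublist hdlt)
  have hs0start : (s0 :: pvDd s0 t).contains (s0 - 1) = false := by
    rw [← Bool.not_eq_true, List.contains_iff_mem]
    intro hmem
    rcases List.mem_cons.mp hmem with h | h
    · omega
    · have := List.rel_of_pairwise_cons hdlt h
      omega
  have hpeel : (s0 :: pvDd s0 t).filter (fun a => !((s0 :: pvDd s0 t).contains (a - 1)))
      = s0 :: (pvDd s0 t).filter (fun a => !((s0 :: pvDd s0 t).contains (a - 1))) := by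
    rw [List.filter_cons]
    simp only [hs0start, Bool.not_false]
    exact if_pos trivial
  have hzip := pvZip_eq_pvGroups (pvDd s0 t) s0 s0 hdlt
  rw [hfs, hfe, hpeel, hzip]
  -- ===== combine =====
  split_ifs with h
  · rw [hA2, pvGroups_pvDd t s0 s0]
  · exfalso
    simp only [bne_iff_ne, ne_eq, Decidable.not_not] at h
    omega
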